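-- pv_equiv track=rewrite | github.com/bermuda-ut/under-education-codes | University_Project_1/neargram_detection.py | nearagram
-- ===== SOURCE A (Python) =====
-- def nearagram(word1, word2):
--     """
--     nearagram returns number n for n-neargram between two words.
--     ex. apple and papal. apple has extra e and missing a therefore
--         apple is 2-neargram of papal. nearagram returns 2.
--     This will be achieved by using the concept of taking both words to a
--     equal point(word).
--
--     Assumptions: the arguments are lower-case, non-empty string.
--
--     Further details regarding the operation are commented within.
--     """
--
--     if len(word1) < len(word2):  # Ensures word1 is always longer.
--         word1, word2 = word2, word1
--
--     extList = list(word1)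
--     for letter in word2:
--         if letter in extList:
--             extList.remove(letter)
--     # extList is list of extra letters in word1.
--     # Removal rather than appending used to take account of multiple letters.
--
--     extra2 = len(extList)+len(word2)-len(word1)
--
--     # (word1) - (extra for word1) = (word2) - (extra for word2)
--     # ex. apple - pple = aaa - aa. Both reach equal word of 'a'
--     # By this, we know that:
--     # len(aa) = len(aaa) - len(apple) + len(pple)
--     #
--     # Therefore by letting extra2 = len(extra for word2), the above
--     # extra2 equation is achieved.
--
--     return len(extList) + extra2
-- ===== SOURCE B (Python) =====
-- def nearagram(word1, word2):
--     a = sorted(word1)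
--     b = sorted(word2)
--     i = j = matched = 0
--     while i < len(a) and j < len(b):
--         if a[i] == b[j]:
--             matched += 1
--             i += 1
--             j += 1
--         elif a[i] < b[j]:
--             i += 1
--         else:
--             j += 1
--     return len(word1) + len(word2) - 2 * matched
-- ===== Notes on version B (the rewrite author's own statement) =====
-- stated objective: faster
-- what changed: Replaced the per-letter membership-test-and-remove scanning over a mutable list with sort-both-words followed by a single two-pointer merge that counts common letters, returning len(word1)+len(word2)-2*matched (the length swap in A is unnecessary since this quantity is symmetric).
import Mathlib
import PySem

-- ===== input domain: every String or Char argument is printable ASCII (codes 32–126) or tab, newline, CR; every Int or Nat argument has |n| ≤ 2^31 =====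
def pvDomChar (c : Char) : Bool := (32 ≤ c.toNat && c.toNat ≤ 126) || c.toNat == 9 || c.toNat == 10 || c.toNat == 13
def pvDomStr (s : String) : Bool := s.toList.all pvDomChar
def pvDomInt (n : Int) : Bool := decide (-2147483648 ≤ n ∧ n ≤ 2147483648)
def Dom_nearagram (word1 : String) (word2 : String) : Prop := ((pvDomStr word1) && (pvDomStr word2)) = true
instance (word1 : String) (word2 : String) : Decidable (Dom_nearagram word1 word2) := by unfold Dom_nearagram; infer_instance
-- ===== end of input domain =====

-- B replaces A's per-letter membership-test-and-remove scanning with sort-both-words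
-- plus a single two-pointer merge counting common letters (objective: faster — sorting replaces quadratic scanning).

-- ===== PORT A =====
-- A's loop: for letter in word2: if letter in extList: extList.remove(letter)
def nearagram (word1 : String) (word2 : String) : Int :=
  let p := if PySem.Str.len word1 < PySem.Str.len word2 then (word2, word1) else (word1, word2)
  let w1 := p.1
  let w2 := p.2
  let extList :=
    w2.toList.foldl
      (fun ext letter =>
        if ext.contains letter then (PySem.List.remove? ext letter).getD ext else ext)
      w1.toList
  let extra2 : Int := PySem.List.len extList + PySem.Str.len w2 - PySem.Str.len w1
  PySem.List.len extList + extra2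

-- ===== PORT B =====
-- the two-pointer while loop of Source B, as structural recursion on the two sorted suffixes
def pvMergeMatched : List Char → List Char → Int
  | [], _ => 0
  | _ :: _, [] => 0
  | x :: xs, y :: ys =>
    if x = y then 1 + pvMergeMatched xs ys
    else if x < y then pvMergeMatched xs (y :: ys)
    else pvMergeMatched (x :: xs) ys
termination_by a b => a.length + b.length

def nearagram_alt (word1 : String) (word2 : String) : Int :=
  let a := PySem.List.sorted word1.toList (fun c => c) false
  let b := PySem.List.sorted word2.toList (fun c => c) false
  PySem.Str.len word1 + PySem.Str.len word2 - 2 * pvMergeMatched a b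

-- ===== PRECONDITION & SPEC =====
def Spec_nearagram (word1 : String) (word2 : String) (out : Int) : Prop := out = nearagram_alt word1 word2
instance (word1 : String) (word2 : String) (out : Int) : Decidable (Spec_nearagram word1 word2 out) := by unfold Spec_nearagram; infer_instance

-- ===== CLAIM (what is proved, stated in full; the proofs are below) =====
def Claim_equal_nearagram : Prop := ∀ (word1 : String) (word2 : String), Dom_nearagram word1 word2 → Spec_nearagram word1 word2 (nearagram word1 word2)

-- ===== LEMMAS AND PROOFS =====

-- the two-pointer merge on sorted lists counts the multiset intersection
lemma mergeMatched_eq_inter_card (a b : List Char)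
    (ha : a.Pairwise (· ≤ ·)) (hb : b.Pairwise (· ≤ ·)) :
    pvMergeMatched a b = (((a : Multiset Char) ∩ (b : Multiset Char)).card : Int) := by
  fun_induction pvMergeMatched a b with
  | case1 b => simp
  | case2 x xs => simp
  | case3 xs x ys ih =>
    rw [List.pairwise_cons] at ha hb
    have key : ((x :: xs : List Char) : Multiset Char) ∩ ((x :: ys : List Char) : Multiset Char)
        = x ::ₘ ((xs : Multiset Char) ∩ (ys : Multiset Char)) := by
      rw [show ((x :: xs : List Char) : Multiset Char) = x ::ₘ (xs : Multiset Char) from rfl,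
          show ((x :: ys : List Char) : Multiset Char) = x ::ₘ (ys : Multiset Char) from rfl,
          Multiset.cons_inter_of_pos _ (Multiset.mem_cons_self x _), Multiset.erase_cons_head]
    rw [key, Multiset.card_cons, ih ha.2 hb.2]
    push_cast
    ring
  | case4 x xs y ys hne hlt ih =>
    rw [List.pairwise_cons] at ha
    have hb' := List.pairwise_cons.mp hb
    have hx : x ∉ ((y :: ys : List Char) : Multiset Char) := by
      rw [Multiset.mem_coe, List.mem_cons]
      rintro (rfl | hmem)
      · exact hne rfl
      · exact absurd hlt (not_lt_of_ge (hb'.1 x hmem))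
    rw [show ((x :: xs : List Char) : Multiset Char) = x ::ₘ (xs : Multiset Char) from rfl,
        Multiset.cons_inter_of_neg _ hx]
    exact ih ha.2 hb
  | case5 x xs y ys hne hnlt ih =>
    have hyx : y < x := lt_of_le_of_ne (le_of_not_gt hnlt) (fun h => hne h.symm)
    rw [List.pairwise_cons] at hb
    have ha' := List.pairwise_cons.mp ha
    have hy : y ∉ ((x :: xs : List Char) : Multiset Char) := by
      rw [Multiset.mem_coe, List.mem_cons]
      rintro (rfl | hmem)
      · exact lt_irrefl _ hyx
      · exact absurd hyx (not_lt_of_ge (ha'.1 y hmem))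
    rw [Multiset.inter_comm,
        show ((y :: ys : List Char) : Multiset Char) = y ::ₘ (ys : Multiset Char) from rfl,
        Multiset.cons_inter_of_neg _ hy, Multiset.inter_comm]
    exact ih ha hb.2

-- A's removal step is List.erase
lemma step_eq_erase (ext : List Char) (letter : Char) :
    (if ext.contains letter then (PySem.List.remove? ext letter).getD ext else ext)
      = ext.erase letter := by
  by_cases h : letter ∈ ext
  · rw [PySem.List.remove?_eq_some_erase ext letter h]
    simp [h]
  · simp [h, List.erase_of_not_mem h]

-- folding List.erase computes the multiset difference
lemma fold_pure_erase_eq_sub (l2 l1 : List Char) :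
    ((l2.foldl (fun ext letter => ext.erase letter) l1 : List Char) : Multiset Char)
      = (l1 : Multiset Char) - (l2 : Multiset Char) := by
  induction l2 generalizing l1 with
  | nil => simp
  | cons y ys ih =>
    rw [List.foldl_cons, ih,
        show ((y :: ys : List Char) : Multiset Char) = y ::ₘ (ys : Multiset Char) from rfl,
        Multiset.sub_cons, Multiset.coe_erase]

-- A's fold computes the multiset difference
lemma fold_erase_eq_sub (l2 l1 : List Char) :
    ((l2.foldl
      (fun ext letter =>
        if ext.contains letter then (PySem.List.remove? ext letter).getD ext else ext)
      l1 : List Char) : Multiset Char) = (l1 : Multiset Char) - (l2 : Multiset Char) := by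
  simp only [step_eq_erase]
  exact fold_pure_erase_eq_sub l2 l1

-- the arithmetic core: A's value on the (possibly swapped) pair (u, v)
lemma core (u v : List Char) :
    (((v.foldl
        (fun ext letter =>
          if ext.contains letter then (PySem.List.remove? ext letter).getD ext else ext)
        u).length : Int) + (((v.foldl
        (fun ext letter =>
          if ext.contains letter then (PySem.List.remove? ext letter).getD ext else ext)
        u).length : Int) + v.length - u.length))
      = u.length + v.length - 2 * (((u : Multiset Char) ∩ (v : Multiset Char)).card : Int) := by
  have hcard : (v.foldl
      (fun ext letter =>
        if ext.contains letter then (PySem.List.remove? ext letter).getD ext else ext)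
      u).length + ((u : Multiset Char) ∩ (v : Multiset Char)).card = u.length := by
    have := congrArg Multiset.card (Multiset.sub_add_inter (u : Multiset Char) (v : Multiset Char))
    rw [Multiset.card_add, ← fold_erase_eq_sub v u] at this
    simpa using this
  omega

-- sorting keeps the multiset
lemma coe_sorted (l : List Char) :
    ((PySem.List.sorted l (fun c => c) false : List Char) : Multiset Char) = (l : Multiset Char) :=
  Multiset.coe_eq_coe.mpr (PySem.List.sorted_perm l (fun c => c) false)

-- ===== VERDICT (by name: the statement is the Claim_ definition above) =====
theorem nearagram_spec : Claim_equal_nearagram := by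
  intro word1 word2 _
  unfold Spec_nearagram nearagram nearagram_alt
  simp only [PySem.Str.len_eq, PySem.List.len_eq]
  have hm := mergeMatched_eq_inter_card
      (PySem.List.sorted word1.toList (fun c => c) false)
      (PySem.List.sorted word2.toList (fun c => c) false)
      (PySem.List.sorted_pairwise word1.toList (fun c => c))
      (PySem.List.sorted_pairwise word2.toList (fun c => c))
  rw [coe_sorted, coe_sorted] at hm
  by_cases h : (word1.toList.length : Int) < (word2.toList.length : Int)
  · simp only [h, if_pos]
    rw [core word2.toList word1.toList, hm, Multiset.inter_comm]
    ring
  · simp only [h, if_neg, not_false_iff]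
    rw [core word1.toList word2.toList, hm]
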